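-- pv_equiv track=rewrite | github.com/uva-cs/dsa2 | slides/src/reductions/uvauserid2.py | check_uva_userid2
-- ===== SOURCE A (Python) =====
-- def check_uva_userid2(what):
--
-- 	state_table = [
-- 		# from each state, where to go on an 'l', 'd', and 'o', respectively
-- 		[], # we numbered our states from 1, so we burn spot 0
-- 		[2,    None, None], # state 1 goes to 2 on a letter
-- 		[3,    None, None], # state 2 goes to 3 on a letter
-- 		[4,    5,    None], # state 3 goes to 4 on a letter and 5 on a digit
-- 		[None, 5,    None], # state 4 goes to 5 on a digit
-- 		[6,    None, None], # state 5 goes to 6 on a letter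
-- 		[7,    None, None], # state 6 goes to 7 on a letter
-- 		[8,    None, None], # state 7 goes to 8 on a letter
-- 		[None, None, None], # no transitions out of state 8
-- 	]
-- 	final_states = [3, 4, 6, 7, 8]
--
-- 	chars = list(what.lower())
-- 	state = 1
-- 	while len(chars) > 0:
-- 		which = 0 if chars[0].isalpha() else 1 if chars[0].isdigit() else 2
-- 		next_state = state_table[state][which]
-- 		if next_state is None: return False
-- 		state = next_state
-- 		chars.pop(0)
-- 	return state in final_states
-- ===== SOURCE B (Python) =====
-- def check_uva_userid2(what):
--     # Linear two-run scan: leading letter run of length 2-3, optionally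
--     # followed by one digit and a second letter run of length 1-3.
--     s = what.lower()
--     n = len(s)
--     i = 0
--     while i < n and s[i].isalpha():
--         i += 1
--     if i < 2 or i > 3:
--         return False
--     if i == n:
--         return True
--     if not s[i].isdigit():
--         return False
--     i += 1
--     j = i
--     while j < n and s[j].isalpha():
--         j += 1
--     return 1 <= j - i <= 3 and j == n
-- ===== Notes on version B (the rewrite author's own statement) =====
-- stated objective: simpler
-- what changed: Replaced the explicit DFA transition table with popping from a char list by a direct two-run scan: measure the leading letter run (must be 2-3), then optionally one digit followed by a letter run of 1-3 reaching the end.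
import Mathlib
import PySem

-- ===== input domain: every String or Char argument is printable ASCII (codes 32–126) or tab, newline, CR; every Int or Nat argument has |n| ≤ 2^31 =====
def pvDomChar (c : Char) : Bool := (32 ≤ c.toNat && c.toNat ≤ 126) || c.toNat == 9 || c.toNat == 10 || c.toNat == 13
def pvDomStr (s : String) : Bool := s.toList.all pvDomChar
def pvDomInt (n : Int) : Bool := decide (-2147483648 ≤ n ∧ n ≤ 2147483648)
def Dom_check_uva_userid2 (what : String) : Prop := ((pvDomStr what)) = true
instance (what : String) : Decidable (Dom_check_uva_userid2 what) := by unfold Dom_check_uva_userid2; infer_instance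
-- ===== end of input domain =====

-- B replaces A's table-driven DFA with pop(0) by a direct two-run scan of the lowered string; objective: simpler.

-- ===== PORT A =====
def pvA_stateTable : List (List (Option Nat)) :=
  [ [],
    [some 2, none,   none],
    [some 3, none,   none],
    [some 4, some 5, none],
    [none,   some 5, none],
    [some 6, none,   none],
    [some 7, none,   none],
    [some 8, none,   none],
    [none,   none,   none] ]

def pvA_finalStates : List Nat := [3, 4, 6, 7, 8]

def pvA_loop (chars : List Char) (state : Nat) : Bool :=
  match chars with
  | [] => decide (state ∈ pvA_finalStates)
  | c :: rest =>
    let which : Int :=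
      if PySem.Chars.isalpha c then 0 else if PySem.Chars.isdigit c then 1 else 2
    -- state_table[state][which]: both indexes are always in range when this line is reached
    match ((PySem.List.pyGet? pvA_stateTable (state : Int)).getD []) with
    | row =>
      match (PySem.List.pyGet? row which).getD none with
      | none => false
      | some ns => pvA_loop rest ns

def check_uva_userid2 (what : String) : Bool :=
  pvA_loop (PySem.Str.lower what).toList 1

-- ===== PORT B =====
-- 'while i < n and s[i].isalpha(): i += 1' — returns (run length, remainder)
def pvB_scanAlpha : List Char → Nat × List Char
  | [] => (0, [])
  | c :: r =>
    if PySem.Chars.isalpha c then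
      let p := pvB_scanAlpha r
      (p.1 + 1, p.2)
    else (0, c :: r)

def check_uva_userid2_alt (what : String) : Bool :=
  let s := (PySem.Str.lower what).toList
  let p := pvB_scanAlpha s
  if p.1 < 2 || 3 < p.1 then false
  else
    match p.2 with
    | [] => true
    | c :: r =>
      if PySem.Chars.isdigit c then
        let q := pvB_scanAlpha r
        decide (1 ≤ q.1 ∧ q.1 ≤ 3 ∧ q.2 = [])
      else false

-- ===== PRECONDITION & SPEC =====
def Spec_check_uva_userid2 (what : String) (out : Bool) : Prop := out = check_uva_userid2_alt what
instance (what : String) (out : Bool) : Decidable (Spec_check_uva_userid2 what out) := by unfold Spec_check_uva_userid2; infer_instance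

-- ===== CLAIM (what is proved, stated in full; the proofs are below) =====
def Claim_equal_check_uva_userid2 : Prop := ∀ (what : String), Dom_check_uva_userid2 what → Spec_check_uva_userid2 what (check_uva_userid2 what)

-- ===== LEMMAS AND PROOFS =====

-- From states 6,7,8 the DFA accepts exactly a pure letter run filling the rest, of length ≤ 8 - s.
lemma pvA_tail678 (cs : List Char) : ∀ s : Nat, 6 ≤ s → s ≤ 8 →
    pvA_loop cs s = decide ((pvB_scanAlpha cs).2 = [] ∧ (pvB_scanAlpha cs).1 + s ≤ 8) := by
  induction cs with
  | nil => intro s h1 h2; interval_cases s <;> decide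
  | cons c r ih =>
    intro s h1 h2
    interval_cases s <;>
      by_cases ha : PySem.Chars.isalpha c <;>
      by_cases hd : PySem.Chars.isdigit c <;>
      simp [pvA_loop, pvB_scanAlpha, ha, hd, pvA_stateTable, PySem.List.pyGet?,
            PySem.List.pyIdx?, ih]

-- From state 5 the DFA accepts exactly a letter run of length 1..3 filling the rest.
lemma pvA_tail5 (cs : List Char) :
    pvA_loop cs 5 = decide (1 ≤ (pvB_scanAlpha cs).1 ∧ (pvB_scanAlpha cs).1 ≤ 3 ∧ (pvB_scanAlpha cs).2 = []) := by
  cases cs with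
  | nil => decide
  | cons c r =>
    by_cases ha : PySem.Chars.isalpha c <;>
      by_cases hd : PySem.Chars.isdigit c <;>
      simp [pvA_loop, pvB_scanAlpha, ha, hd, pvA_stateTable, PySem.List.pyGet?,
            PySem.List.pyIdx?, pvA_tail678 r 6 (by omega) (by omega)] <;>
      simp [Bool.and_comm, Nat.lt_succ_iff]

-- From states 3,4 the DFA allows the first letter run to continue up to total length 4 - s
-- and then, if anything is left, demands a digit and hands over to state 5.
lemma pvA_tail34 (cs : List Char) : ∀ s : Nat, 3 ≤ s → s ≤ 4 →
    pvA_loop cs s =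
      (if 4 < (pvB_scanAlpha cs).1 + s then false
       else match (pvB_scanAlpha cs).2 with
         | [] => true
         | c :: t => if PySem.Chars.isdigit c then pvA_loop t 5 else false) := by
  induction cs with
  | nil => intro s h1 h2; interval_cases s <;> decide
  | cons c r ih =>
    intro s h1 h2
    interval_cases s <;>
      by_cases ha : PySem.Chars.isalpha c <;>
      by_cases hd : PySem.Chars.isdigit c <;>
      simp [pvA_loop, pvB_scanAlpha, ha, hd, pvA_stateTable, PySem.List.pyGet?,
            PySem.List.pyIdx?, ih 4 (by omega) (by omega),
            show ∀ x : Nat, (4 < x + 4) ↔ (0 < x) from by omega]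

-- the list-level equivalence of the two programs (both read the same lowered char list)
lemma pv_main (cs : List Char) :
    pvA_loop cs 1 =
      (let p := pvB_scanAlpha cs
       if p.1 < 2 || 3 < p.1 then false
       else
         match p.2 with
         | [] => true
         | c :: r =>
           if PySem.Chars.isdigit c then
             let q := pvB_scanAlpha r
             decide (1 ≤ q.1 ∧ q.1 ≤ 3 ∧ q.2 = [])
           else false) := by
  match cs with
  | [] => decide
  | [c] =>
    by_cases ha : PySem.Chars.isalpha c <;>
      by_cases hd : PySem.Chars.isdigit c <;>
      simp [pvA_loop, pvB_scanAlpha, ha, hd, pvA_stateTable, PySem.List.pyGet?, PySem.List.pyIdx?] <;> decide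
  | c1 :: c2 :: r2 =>
    by_cases h1 : PySem.Chars.isalpha c1 <;>
      by_cases hd1 : PySem.Chars.isdigit c1 <;>
      by_cases h2 : PySem.Chars.isalpha c2 <;>
      by_cases hd2 : PySem.Chars.isdigit c2 <;>
      simp [pvA_loop, pvB_scanAlpha, h1, hd1, h2, hd2, pvA_stateTable, PySem.List.pyGet?,
            PySem.List.pyIdx?, pvA_tail34 r2 3 (by omega) (by omega), pvA_tail5] <;>
      rcases hr : (pvB_scanAlpha r2).2 with _ | ⟨c3, t⟩ <;>
      simp [show ∀ x : Nat, (4 < x + 3) ↔ (2 ≤ x) from by omega]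

-- ===== VERDICT (by name: the statement is the Claim_ definition above) =====
theorem check_uva_userid2_spec : Claim_equal_check_uva_userid2 := by
  intro what _
  unfold Spec_check_uva_userid2 check_uva_userid2 check_uva_userid2_alt
  exact pv_main _
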